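-- pv_equiv track=rewrite | github.com/Afra-greenleaf/Deep-NLP-homework | homework3/train-updata-3.py | avoid_repetition
-- ===== SOURCE A (Python) =====
-- def avoid_repetition(generated_text, next_word, n=2):
--     # 检查是否生成了重复的n-gram
--     if len(generated_text) >= n:
--         n_gram = generated_text[-(n-1):] + [next_word]
--         if n_gram in [generated_text[i:i+n] for i in range(len(generated_text)-n+1)]:
--             return True
--     # 检查是否生成了重复的单词
--     if next_word in generated_text:
--         return True
--     return False
-- ===== SOURCE B (Python) =====
-- def avoid_repetition(generated_text, next_word, n=2):
--     # A's n-gram window scan is redundant: a matching window is a contiguous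
--     # slice of generated_text ending in next_word, so it can only match when
--     # next_word already occurs in generated_text.  A single membership test
--     # is therefore exact for every n.
--     return next_word in generated_text
-- ===== Notes on version B (the rewrite author's own statement) =====
-- stated objective: faster
-- what changed: Dropped A's n-gram construction and window scan entirely: any matching window is a contiguous slice of generated_text ending in next_word, so it can only match when next_word already occurs in the text, and the whole function reduces to a single 'next_word in generated_text' membership test, exact for every n.
import Mathlib
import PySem

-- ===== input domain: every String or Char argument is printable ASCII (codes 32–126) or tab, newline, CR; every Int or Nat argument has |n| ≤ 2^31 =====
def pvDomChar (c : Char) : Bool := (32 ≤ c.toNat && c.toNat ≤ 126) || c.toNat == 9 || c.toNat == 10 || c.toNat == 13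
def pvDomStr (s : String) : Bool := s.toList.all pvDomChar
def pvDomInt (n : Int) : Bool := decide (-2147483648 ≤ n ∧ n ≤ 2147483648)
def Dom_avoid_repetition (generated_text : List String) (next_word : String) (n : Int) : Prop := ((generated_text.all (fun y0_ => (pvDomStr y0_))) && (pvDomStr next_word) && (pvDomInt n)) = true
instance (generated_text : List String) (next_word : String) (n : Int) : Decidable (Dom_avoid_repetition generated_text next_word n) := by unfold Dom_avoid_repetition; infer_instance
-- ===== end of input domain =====

-- B drops A's redundant n-gram window scan: a matching window always ends in
-- next_word, so A is equivalent to a plain membership test (objective: simpler).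

-- ===== PORT A =====
def avoid_repetition (generated_text : List String) (next_word : String) (n : Int) : Bool :=
  if n ≤ (generated_text.length : Int) then
    -- n_gram = generated_text[-(n-1):] + [next_word]; windows = [generated_text[i:i+n] for i in range(len-n+1)]
    if PySem.List.slice generated_text (some (-(n - 1))) none ++ [next_word] ∈
        (PySem.List.pyRange 0 ((generated_text.length : Int) - n + 1) 1).map
          (fun i => PySem.List.slice generated_text (some i) (some (i + n))) then true
    else if next_word ∈ generated_text then true else false
  else if next_word ∈ generated_text then true else false

-- ===== PORT B =====
def avoid_repetition_alt (generated_text : List String) (next_word : String) (n : Int) : Bool :=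
  generated_text.contains next_word

-- ===== PRECONDITION & SPEC =====
def Spec_avoid_repetition (generated_text : List String) (next_word : String) (n : Int) (out : Bool) : Prop := out = avoid_repetition_alt generated_text next_word n
instance (generated_text : List String) (next_word : String) (n : Int) (out : Bool) : Decidable (Spec_avoid_repetition generated_text next_word n out) := by unfold Spec_avoid_repetition; infer_instance

-- ===== CLAIM (what is proved, stated in full; the proofs are below) =====
def Claim_equal_avoid_repetition : Prop := ∀ (generated_text : List String) (next_word : String) (n : Int), Dom_avoid_repetition generated_text next_word n → Spec_avoid_repetition generated_text next_word n (avoid_repetition generated_text next_word n)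

-- ===== LEMMAS AND PROOFS =====

-- If the freshly built n-gram equals one of the windows, its last element
-- (next_word) lies in that window, which is a contiguous slice of the text.
theorem mem_of_ngram_match (generated_text : List String) (next_word : String) (n : Int)
    (h : PySem.List.slice generated_text (some (-(n - 1))) none ++ [next_word] ∈
      (PySem.List.pyRange 0 ((generated_text.length : Int) - n + 1) 1).map
        (fun i => PySem.List.slice generated_text (some i) (some (i + n)))) :
    next_word ∈ generated_text := by
  rcases List.mem_map.mp h with ⟨i, _, hw⟩
  have hmem : next_word ∈ PySem.List.slice generated_text (some i) (some (i + n)) := by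
    rw [hw]; simp
  exact PySem.List.mem_of_mem_slice _ _ _ hmem

-- ===== VERDICT (by name: the statement is the Claim_ definition above) =====
theorem avoid_repetition_spec : Claim_equal_avoid_repetition := by
  intro generated_text next_word n _
  unfold Spec_avoid_repetition avoid_repetition avoid_repetition_alt
  by_cases h1 : n ≤ (generated_text.length : Int)
  · by_cases h2 : PySem.List.slice generated_text (some (-(n - 1))) none ++ [next_word] ∈
        (PySem.List.pyRange 0 ((generated_text.length : Int) - n + 1) 1).map
          (fun i => PySem.List.slice generated_text (some i) (some (i + n)))
    · have hm := mem_of_ngram_match generated_text next_word n h2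
      simp [h1, hm]
    · rw [if_pos h1, if_neg h2]
      by_cases h3 : next_word ∈ generated_text <;> simp [h3]
  · by_cases h3 : next_word ∈ generated_text <;> simp [h1, h3]
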